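-- pv_equiv track=rewrite | github.com/Creak77/CSC384-intro-to-AI-project | CSC384/A3/battle.py | getSpeicalShipPos
-- ===== SOURCE A (Python) =====
-- def getSpeicalShipPos(board):
--     MList = []
--     SList = []
--     upList = []
--     downList = []
--     leftList = []
--     rightList = []
--     SpeicalShipPos = []
--     for i in range(len(board)):
--         for j in range(len(board)):
--             if board[i][j] == 'M':
--                 MList.append((i, j))
--             elif board[i][j] == 'S':
--                 SList.append((i, j))
--             elif board[i][j] == '^':
--                 upList.append((i, j))
--             elif board[i][j] == 'v':
--                 downList.append((i, j))
--             elif board[i][j] == '<':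
--                 leftList.append((i, j))
--             elif board[i][j] == '>':
--                 rightList.append((i, j))
--     SpeicalShipPos.append(MList)
--     SpeicalShipPos.append(SList)
--     SpeicalShipPos.append(upList)
--     SpeicalShipPos.append(downList)
--     SpeicalShipPos.append(leftList)
--     SpeicalShipPos.append(rightList)
--     return SpeicalShipPos
-- ===== SOURCE B (Python) =====
-- def getSpeicalShipPos(board):
--     n = len(board)
--     return [[(i, j) for i, row in enumerate(board) for j in range(n) if row[j] == m]
--             for m in ('M', 'S', '^', 'v', '<', '>')]
-- ===== Notes on version B (the rewrite author's own statement) =====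
-- stated objective: simpler
-- what changed: Replaces the six named accumulator lists and the six-way elif chain with one comprehension per marker character over the enumerated rows, assembled directly into the result list.
import Mathlib
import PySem

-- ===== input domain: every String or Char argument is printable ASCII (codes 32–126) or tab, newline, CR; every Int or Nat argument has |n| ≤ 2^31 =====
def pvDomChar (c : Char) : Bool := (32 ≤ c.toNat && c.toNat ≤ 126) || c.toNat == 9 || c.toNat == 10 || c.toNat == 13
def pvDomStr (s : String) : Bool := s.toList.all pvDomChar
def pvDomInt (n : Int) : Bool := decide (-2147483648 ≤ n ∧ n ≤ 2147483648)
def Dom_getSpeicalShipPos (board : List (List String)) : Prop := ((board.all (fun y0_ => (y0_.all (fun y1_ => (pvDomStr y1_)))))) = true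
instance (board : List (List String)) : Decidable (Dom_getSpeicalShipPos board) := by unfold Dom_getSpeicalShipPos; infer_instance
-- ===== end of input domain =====

-- B replaces A's six named accumulators and six-way elif chain by one comprehension
-- per marker character over the enumerated rows; equal output on all boards whose rows
-- are at least as long as the board (where A does not raise).

-- ===== PORT A =====
-- the expression board[i][j]
def pvCell (board : List (List String)) (i j : Int) : String :=
  PySem.List.pyGetD (PySem.List.pyGetD board i []) j ""

-- state: (MList, SList, upList, downList, leftList, rightList)
abbrev pvStateA : Type := List (Int × Int) × List (Int × Int) × List (Int × Int) × List (Int × Int) × List (Int × Int) × List (Int × Int)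

-- body of the inner loop: the elif chain on board[i][j]
def pvStepA (board : List (List String)) (st : pvStateA) (i j : Int) : pvStateA :=
  let c := pvCell board i j
  if c = "M" then (st.1 ++ [(i, j)], st.2.1, st.2.2.1, st.2.2.2.1, st.2.2.2.2.1, st.2.2.2.2.2)
  else if c = "S" then (st.1, st.2.1 ++ [(i, j)], st.2.2.1, st.2.2.2.1, st.2.2.2.2.1, st.2.2.2.2.2)
  else if c = "^" then (st.1, st.2.1, st.2.2.1 ++ [(i, j)], st.2.2.2.1, st.2.2.2.2.1, st.2.2.2.2.2)
  else if c = "v" then (st.1, st.2.1, st.2.2.1, st.2.2.2.1 ++ [(i, j)], st.2.2.2.2.1, st.2.2.2.2.2)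
  else if c = "<" then (st.1, st.2.1, st.2.2.1, st.2.2.2.1, st.2.2.2.2.1 ++ [(i, j)], st.2.2.2.2.2)
  else if c = ">" then (st.1, st.2.1, st.2.2.1, st.2.2.2.1, st.2.2.2.2.1, st.2.2.2.2.2 ++ [(i, j)])
  else st

def getSpeicalShipPos (board : List (List String)) : List (List (Int × Int)) :=
  let n : Int := (board.length : Int)
  let st : pvStateA :=
    (PySem.List.pyRange 0 n 1).foldl
      (fun st i => (PySem.List.pyRange 0 n 1).foldl (fun st j => pvStepA board st i j) st)
      ([], [], [], [], [], [])
  [st.1, st.2.1, st.2.2.1, st.2.2.2.1, st.2.2.2.2.1, st.2.2.2.2.2]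

-- ===== PORT B =====
-- one bucket per marker: [(i, j) for i, row in enumerate(board) for j in range(n) if row[j] == m]
-- (row[j] raises on a short row in Python; pyGetD is exact on the in-range indices Pre_ admits)
def pvBucket (board : List (List String)) (m : String) : List (Int × Int) :=
  let n : Int := (board.length : Int)
  (PySem.List.enumerate board).flatMap (fun p =>
    (PySem.List.pyRange 0 n 1).filterMap (fun j =>
      if PySem.List.pyGetD p.2 j "" = m then some (p.1, j) else none))

def getSpeicalShipPos_alt (board : List (List String)) : List (List (Int × Int)) :=
  ["M", "S", "^", "v", "<", ">"].map (pvBucket board)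

-- ===== PRECONDITION & SPEC =====
-- Pre_ excludes boards with a row shorter than the number of rows: there A raises IndexError.
def Pre_getSpeicalShipPos (board : List (List String)) : Prop :=
  ∀ row ∈ board, board.length ≤ row.length
instance (board : List (List String)) : Decidable (Pre_getSpeicalShipPos board) := by unfold Pre_getSpeicalShipPos; infer_instance

def pvWitness_getSpeicalShipPos : List (List String) := [["M", "S"], ["^", ">"]]

def Spec_getSpeicalShipPos (board : List (List String)) (out : List (List (Int × Int))) : Prop := out = getSpeicalShipPos_alt board
instance (board : List (List String)) (out : List (List (Int × Int))) : Decidable (Spec_getSpeicalShipPos board out) := by unfold Spec_getSpeicalShipPos; infer_instance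

-- ===== CLAIM (what is proved, stated in full; the proofs are below) =====
def Claim_equal_getSpeicalShipPos : Prop := ∀ (board : List (List String)), Dom_getSpeicalShipPos board → Pre_getSpeicalShipPos board → Spec_getSpeicalShipPos board (getSpeicalShipPos board)

-- ===== LEMMAS AND PROOFS =====

-- cells of the inner loop that land in bucket m
def pvSelInner (board : List (List String)) (m : String) (i : Int) (L : List Int) : List (Int × Int) :=
  L.filterMap (fun j => if pvCell board i j = m then some (i, j) else none)

def pvSelOuter (board : List (List String)) (m : String) (L : List Int) : List (Int × Int) :=
  L.flatMap (fun i => pvSelInner board m i (PySem.List.pyRange 0 (board.length : Int) 1))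

theorem pvSelInner_cons (board : List (List String)) (m : String) (i j : Int) (L : List Int) :
    pvSelInner board m i (j :: L) =
      (if pvCell board i j = m then [(i, j)] else []) ++ pvSelInner board m i L := by
  simp only [pvSelInner, List.filterMap_cons]
  split_ifs <;> simp

theorem pvStepA_eq (board : List (List String)) (st : pvStateA) (i j : Int) :
    pvStepA board st i j =
      (st.1 ++ (if pvCell board i j = "M" then [(i, j)] else []),
       st.2.1 ++ (if pvCell board i j = "S" then [(i, j)] else []),
       st.2.2.1 ++ (if pvCell board i j = "^" then [(i, j)] else []),
       st.2.2.2.1 ++ (if pvCell board i j = "v" then [(i, j)] else []),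
       st.2.2.2.2.1 ++ (if pvCell board i j = "<" then [(i, j)] else []),
       st.2.2.2.2.2 ++ (if pvCell board i j = ">" then [(i, j)] else [])) := by
  simp only [pvStepA]
  split_ifs <;> simp_all

theorem pvInner_char (board : List (List String)) (i : Int) (L : List Int) (st : pvStateA) :
    L.foldl (fun st j => pvStepA board st i j) st =
      (st.1 ++ pvSelInner board "M" i L, st.2.1 ++ pvSelInner board "S" i L,
       st.2.2.1 ++ pvSelInner board "^" i L, st.2.2.2.1 ++ pvSelInner board "v" i L,
       st.2.2.2.2.1 ++ pvSelInner board "<" i L, st.2.2.2.2.2 ++ pvSelInner board ">" i L) := by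
  induction L generalizing st with
  | nil => simp [pvSelInner]
  | cons j L ih =>
    rw [List.foldl_cons, pvStepA_eq, ih]
    simp only [pvSelInner_cons]
    simp [List.append_assoc]

theorem pvOuter_char (board : List (List String)) (L : List Int) (st : pvStateA) :
    L.foldl (fun st i => (PySem.List.pyRange 0 (board.length : Int) 1).foldl (fun st j => pvStepA board st i j) st) st =
      (st.1 ++ pvSelOuter board "M" L, st.2.1 ++ pvSelOuter board "S" L,
       st.2.2.1 ++ pvSelOuter board "^" L, st.2.2.2.1 ++ pvSelOuter board "v" L,
       st.2.2.2.2.1 ++ pvSelOuter board "<" L, st.2.2.2.2.2 ++ pvSelOuter board ">" L) := by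
  induction L generalizing st with
  | nil => simp [pvSelOuter]
  | cons i L ih =>
    rw [List.foldl_cons, pvInner_char, ih]
    simp [pvSelOuter, List.append_assoc]

theorem pvBucket_eq (board : List (List String)) (m : String) :
    pvBucket board m = pvSelOuter board m (PySem.List.pyRange 0 (board.length : Int) 1) := by
  unfold pvBucket pvSelOuter pvSelInner pvCell
  rw [PySem.List.enumerate_eq_map_pyRange board [], List.flatMap_map]
  have hlen : PySem.List.len board = (board.length : Int) := by
    simp [PySem.List.len]
  rw [hlen]

theorem getSpeicalShipPos_spec : Claim_equal_getSpeicalShipPos := by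
  intro board _ _
  unfold Spec_getSpeicalShipPos getSpeicalShipPos getSpeicalShipPos_alt
  simp only [pvOuter_char, List.nil_append, List.map_cons, List.map_nil]
  simp [pvBucket_eq]
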